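-- pv_equiv track=rewrite | github.com/GetCon-Hungary/fmc-analyser | Main.py | get_network_size_from_clients
-- ===== SOURCE A (Python) =====
-- def get_network_size_from_clients(n):
--
--     # Initialize a mask
--     mask = 0x80000000  # 0b10000000000000000000000000000000
--
--     # Find the leftmost set bit
--     position = 32
--     while position > 0:
--         if n-mask > 0:
--             half_mask = mask >> 1
--             if n-mask-half_mask > 0:
--                 return position
--             else:
--                    return position - 1
--         mask >>= 1
--         position -= 1
--
--     return 0  # Should not reach here, but just in case
-- ===== SOURCE B (Python) =====
-- def get_network_size_from_clients(n):
--     # Closed form: bit position of the leftmost set bit, rounded down unless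
--     # n exceeds 1.5 * 2^(b-1); n <= 1 yields 0.
--     if n <= 1:
--         return 0
--     b = n.bit_length()
--     return b if n > (1 << (b - 1)) + (1 << (b - 2)) else b - 1
-- ===== Notes on version B (the rewrite author's own statement) =====
-- stated objective: simpler
-- what changed: Replaces the 32-iteration descending bit-scan loop with a closed form: guard n<=1, then compute b=n.bit_length() and compare n once against 2^(b-1)+2^(b-2).
import Mathlib
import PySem

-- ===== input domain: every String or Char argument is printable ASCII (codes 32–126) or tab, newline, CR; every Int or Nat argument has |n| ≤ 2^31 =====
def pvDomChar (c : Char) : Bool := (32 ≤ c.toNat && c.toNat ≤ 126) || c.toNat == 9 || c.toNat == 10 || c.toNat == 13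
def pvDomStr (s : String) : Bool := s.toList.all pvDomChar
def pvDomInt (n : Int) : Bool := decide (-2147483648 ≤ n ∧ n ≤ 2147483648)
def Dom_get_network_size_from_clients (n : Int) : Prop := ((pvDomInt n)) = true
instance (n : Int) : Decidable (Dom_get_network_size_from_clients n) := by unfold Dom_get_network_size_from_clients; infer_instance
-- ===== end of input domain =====

-- B: closed form via bit_length instead of A's 32-step descending bit-scan loop (return value only; simpler).
-- ===== PORT A =====
-- loop 'while position > 0' ported as structural recursion on position (a Nat fuel);
-- 'mask >> 1' on the nonnegative mask is exactly 'mask / 2' (Int.ediv on nonnegatives = floor).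
def pvA_loop (n : Int) : Nat → Int → Int
  | 0, _ => 0
  | Nat.succ k, mask =>
    if n - mask > 0 then
      let half_mask := mask / 2
      if n - mask - half_mask > 0 then ((k : Int) + 1) else (k : Int)
    else pvA_loop n k (mask / 2)

def get_network_size_from_clients (n : Int) : Int := pvA_loop n 32 0x80000000

-- ===== PORT B =====
-- n.bit_length() for n ≥ 2 is Nat.size of n.toNat; '1 << k' is 2^k.
def get_network_size_from_clients_alt (n : Int) : Int :=
  if n ≤ 1 then 0
  else
    let b : Nat := n.toNat.size
    if n > (2 : Int) ^ (b - 1) + (2 : Int) ^ (b - 2) then (b : Int) else (b : Int) - 1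

-- ===== PRECONDITION & SPEC =====
def Spec_get_network_size_from_clients (n : Int) (out : Int) : Prop := out = get_network_size_from_clients_alt n
instance (n : Int) (out : Int) : Decidable (Spec_get_network_size_from_clients n out) := by unfold Spec_get_network_size_from_clients; infer_instance

-- ===== CLAIM (what is proved, stated in full; the proofs are below) =====
def Claim_equal_get_network_size_from_clients : Prop := ∀ (n : Int), Dom_get_network_size_from_clients n → Spec_get_network_size_from_clients n (get_network_size_from_clients n)

-- ===== LEMMAS AND PROOFS =====

-- ===== VERDICT (by name: the statement is the Claim_ definition above) =====
-- For n ≤ 1 the loop never fires (mask stays ≥ 1), so A returns 0.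
lemma pvA_loop_le_one (n : Int) (hn : n ≤ 1) : ∀ k : Nat, pvA_loop n (k + 1) ((2 : Int) ^ k) = 0 := by
  intro k
  induction k with
  | zero => simp [pvA_loop]; omega
  | succ j ih =>
      have hmask : (1 : Int) ≤ 2 ^ (j + 1) := one_le_pow₀ (by norm_num)
      have hdiv : ((2 : Int) ^ (j + 1)) / 2 = 2 ^ j := by
        rw [pow_succ]; exact Int.mul_ediv_cancel _ (by norm_num)
      rw [pvA_loop]
      rw [if_neg (by omega), hdiv, ih]

lemma size_eq_succ {m k : Nat} (h1 : 2 ^ k ≤ m) (h2 : m < 2 ^ (k + 1)) : m.size = k + 1 := by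
  have hle : m.size ≤ k + 1 := Nat.size_le.mpr h2
  have hlt : k < m.size := Nat.lt_size.mpr h1
  omega

-- Loop invariant: with fuel k and mask 2^k / 2, for 2 ≤ n ≤ 2^k the loop computes B's closed form.
lemma pvA_loop_main (n : Int) (hn : 2 ≤ n) :
    ∀ k : Nat, n ≤ 2 ^ k → pvA_loop n k ((2 : Int) ^ k / 2) = get_network_size_from_clients_alt n := by
  intro k
  induction k with
  | zero => intro h; norm_num at h; omega
  | succ j ih =>
      intro hub
      have hdiv : ((2 : Int) ^ (j + 1)) / 2 = 2 ^ j := by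
        rw [pow_succ]; exact Int.mul_ediv_cancel _ (by norm_num)
      rw [pvA_loop, hdiv]
      by_cases hfire : n - (2 : Int) ^ j > 0
      · rw [if_pos hfire]
        have hnt2 : (n.toNat : Int) = n := Int.toNat_of_nonneg (by omega)
        have hBnot : ¬ n ≤ 1 := by omega
        -- two subcases: n = 2^(j+1) (bit length j+2) or 2^j < n < 2^(j+1) (bit length j+1)
        by_cases htop : n = 2 ^ (j + 1)
        · have hsize : n.toNat.size = j + 2 := by
            apply size_eq_succ
            · have : ((2 ^ (j + 1) : Nat) : Int) ≤ (n.toNat : Int) := by push_cast; omega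
              exact_mod_cast this
            · have : ((n.toNat : Int)) < ((2 ^ (j + 2) : Nat) : Int) := by
                push_cast
                have : (2 : Int) ^ (j + 1) < 2 ^ (j + 2) := by
                  have := one_le_pow₀ (n := j + 1) (a := (2 : Int)) (by norm_num)
                  rw [pow_succ (n := j + 1)]; nlinarith
                omega
              exact_mod_cast this
          rw [get_network_size_from_clients_alt, if_neg hBnot]
          simp only [hsize]
          have hb1 : j + 2 - 1 = j + 1 := by omega
          have hb2 : j + 2 - 2 = j := by omega
          rw [hb1, hb2]
          have hBno : ¬ n > (2 : Int) ^ (j + 1) + 2 ^ j := by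
            have := one_le_pow₀ (n := j) (a := (2 : Int)) (by norm_num)
            omega
          rw [if_neg hBno]
          -- A side: fires with half = 2^j/2 and returns j+1
          cases j with
          | zero => norm_num at htop ⊢; omega
          | succ i =>
              have hdiv2 : ((2 : Int) ^ (i + 1)) / 2 = 2 ^ i := by
                rw [pow_succ]; exact Int.mul_ediv_cancel _ (by norm_num)
              simp only [hdiv2]
              have hpos : n - (2 : Int) ^ (i + 1) - 2 ^ i > 0 := by
                have h1 : (1 : Int) ≤ 2 ^ i := one_le_pow₀ (by norm_num)
                have : n = 2 ^ (i + 2) := htop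
                rw [this, pow_succ, pow_succ]; nlinarith
              rw [if_pos hpos]; push_cast; ring
        · have hublt : n < 2 ^ (j + 1) := by
            rcases lt_or_eq_of_le hub with h | h
            · exact h
            · exact absurd h htop
          have hsize : n.toNat.size = j + 1 := by
            apply size_eq_succ
            · have : ((2 ^ j : Nat) : Int) ≤ (n.toNat : Int) := by push_cast; omega
              exact_mod_cast this
            · have : ((n.toNat : Int)) < ((2 ^ (j + 1) : Nat) : Int) := by push_cast; omega
              exact_mod_cast this
          rw [get_network_size_from_clients_alt, if_neg hBnot]
          simp only [hsize]
          cases j with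
          | zero =>
              -- 1 < n < 2: impossible for integers
              norm_num at hfire hublt; omega
          | succ i =>
              have hb1 : i + 1 + 1 - 1 = i + 1 := by omega
              have hb2 : i + 1 + 1 - 2 = i := by omega
              rw [hb1, hb2]
              have hdiv2 : ((2 : Int) ^ (i + 1)) / 2 = 2 ^ i := by
                rw [pow_succ]; exact Int.mul_ediv_cancel _ (by norm_num)
              simp only [hdiv2]
              by_cases hmid : n - (2 : Int) ^ (i + 1) - 2 ^ i > 0
              · rw [if_pos hmid, if_pos (by omega)]; push_cast; ring
              · rw [if_neg hmid, if_neg (by omega)]; push_cast; ring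
      · rw [if_neg hfire]
        exact ih (by omega)

theorem get_network_size_from_clients_spec : Claim_equal_get_network_size_from_clients := by
  intro n hd
  have hdom : -2147483648 ≤ n ∧ n ≤ 2147483648 := by
    simpa [Dom_get_network_size_from_clients, pvDomInt] using hd
  unfold Spec_get_network_size_from_clients get_network_size_from_clients
  by_cases h1 : n ≤ 1
  · have hA := pvA_loop_le_one n h1 31
    norm_num at hA ⊢
    rw [hA]
    rw [get_network_size_from_clients_alt, if_pos h1]
  · have h2 : 2 ≤ n := by omega
    have hub : n ≤ 2 ^ 32 := by
      have : n ≤ 2147483648 := hdom.2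
      norm_num; omega
    have := pvA_loop_main n h2 32 hub
    norm_num at this ⊢
    exact this
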